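-- pv_equiv track=rewrite | github.com/Prince200307/Aura | aura-backend/app/routers/recommendations.py | get_last_n_months
-- ===== SOURCE A (Python) =====
-- from typing import List, Optional, Dict, Any
--
-- def get_last_n_months(user_id: int, n: int) -> List[str]:
--     months = []
--     year, month = 2026, 5
--     for _ in range(n):
--         months.append(f"{year}-{month:02d}")
--         month -= 1
--         if month == 0:
--             month = 12
--             year -= 1
--     return months
-- ===== SOURCE B (Python) =====
-- def _fmt(idx):
--     return f"{idx // 12}-{idx % 12 + 1:02d}"
--
--
-- def get_last_n_months(user_id: int, n: int):
--     base = 2026 * 12 + 4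
--     return [_fmt(base - i) for i in range(n)]
-- ===== Notes on version B (the rewrite author's own statement) =====
-- stated objective: idiomatic
-- what changed: B replaces A's running (year, month) state with a December-rollover carry branch by a stateless comprehension that decodes each month directly from an absolute month index with // and %.
import Mathlib
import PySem

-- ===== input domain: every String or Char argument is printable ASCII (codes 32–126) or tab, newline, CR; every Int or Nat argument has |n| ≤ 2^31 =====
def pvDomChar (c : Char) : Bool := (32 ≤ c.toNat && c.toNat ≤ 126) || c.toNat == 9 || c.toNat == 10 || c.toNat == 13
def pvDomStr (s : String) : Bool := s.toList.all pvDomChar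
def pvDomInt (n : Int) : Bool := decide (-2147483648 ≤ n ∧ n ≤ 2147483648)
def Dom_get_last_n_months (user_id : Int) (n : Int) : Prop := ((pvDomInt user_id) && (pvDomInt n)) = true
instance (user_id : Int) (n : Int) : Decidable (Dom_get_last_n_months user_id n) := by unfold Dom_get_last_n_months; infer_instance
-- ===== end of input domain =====

-- B replaces A's running (year, month) pair with its carry branch by a stateless
-- comprehension decoding each month from an absolute month index via // and % (idiomatic).


-- ===== PORT A =====
-- f"{year}-{month:02d}": month is always in 1..12 here, so :02d pads exactly when month < 10
def fmtA (year month : Int) : String :=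
  PySem.Int.toStr year ++ "-" ++
    (if month < 10 then "0" ++ PySem.Int.toStr month else PySem.Int.toStr month)

def get_last_n_months (user_id : Int) (n : Int) : List String :=
  let st := (PySem.List.pyRange 0 n 1).foldl
    (fun (st : List String × Int × Int) _ =>
      let months := st.1 ++ [fmtA st.2.1 st.2.2]
      let month := st.2.2 - 1
      if month == 0 then (months, st.2.1 - 1, 12) else (months, st.2.1, month))
    ([], 2026, 5)
  st.1

-- ===== PORT B =====
-- _fmt: idx % 12 + 1 is always in 1..12 (Python % with positive divisor), so :02d pads iff < 10
def pvFmt (idx : Int) : String :=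
  PySem.Int.toStr (PySem.Int.floordiv idx 12) ++ "-" ++
    (let m := PySem.Int.mod idx 12 + 1
     if m < 10 then "0" ++ PySem.Int.toStr m else PySem.Int.toStr m)

def get_last_n_months_alt (user_id : Int) (n : Int) : List String :=
  let base : Int := 2026 * 12 + 4
  (PySem.List.pyRange 0 n 1).map (fun i => pvFmt (base - i))

-- ===== PRECONDITION & SPEC =====
def Spec_get_last_n_months (user_id : Int) (n : Int) (out : List String) : Prop := out = get_last_n_months_alt user_id n
instance (user_id : Int) (n : Int) (out : List String) : Decidable (Spec_get_last_n_months user_id n out) := by unfold Spec_get_last_n_months; infer_instance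

-- ===== CLAIM (what is proved, stated in full; the proofs are below) =====
def Claim_equal_get_last_n_months : Prop := ∀ (user_id : Int) (n : Int), Dom_get_last_n_months user_id n → Spec_get_last_n_months user_id n (get_last_n_months user_id n)

-- ===== LEMMAS AND PROOFS =====

theorem pvFmt_encode (year month : Int) (h1 : 1 ≤ month) (h2 : month ≤ 12) :
    pvFmt (year * 12 + (month - 1)) = fmtA year month := by
  have hdiv : PySem.Int.floordiv (year * 12 + (month - 1)) 12 = year := by
    rw [PySem.Int.floordiv_eq_iff_of_pos (by norm_num)]
    omega
  have hmod : PySem.Int.mod (year * 12 + (month - 1)) 12 = month - 1 := by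
    have := PySem.Int.floordiv_mul_add_mod (year * 12 + (month - 1)) 12
    rw [hdiv] at this
    omega
  simp only [pvFmt, fmtA]
  rw [hdiv, hmod]
  have h : month - 1 + 1 = month := by omega
  rw [h]

theorem loopA_eq (l : List Int) (ms : List String) (year month : Int)
    (h1 : 1 ≤ month) (h2 : month ≤ 12) :
    (l.foldl
      (fun (st : List String × Int × Int) _ =>
        let months := st.1 ++ [fmtA st.2.1 st.2.2]
        let month := st.2.2 - 1
        if month == 0 then (months, st.2.1 - 1, 12) else (months, st.2.1, month))
      (ms, year, month)).1
    = ms ++ (List.range l.length).map (fun k : Nat => pvFmt (year * 12 + (month - 1) - (k : Int))) := by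
  induction l generalizing ms year month with
  | nil => simp
  | cons x t ih =>
    simp only [List.foldl_cons, List.length_cons]
    by_cases hc : month - 1 = 0
    · have hm : month = 1 := by omega
      rw [show (if (month - 1 == 0) = true then
            (ms ++ [fmtA year month], year - 1, (12 : Int))
          else (ms ++ [fmtA year month], year, month - 1))
          = (ms ++ [fmtA year month], year - 1, (12 : Int)) by simp [hc]]
      rw [ih _ _ _ (by norm_num) (by norm_num)]
      rw [List.range_succ_eq_map]
      simp only [List.map_cons, List.map_map, List.append_assoc, List.singleton_append]
      congr 1
      · congr 1
        · rw [← pvFmt_encode year month h1 h2]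
          congr 1; omega
        · apply List.map_congr_left
          intro k _
          simp only [Function.comp]
          congr 1
          push_cast
          omega
    · rw [show (if (month - 1 == 0) = true then
            (ms ++ [fmtA year month], year - 1, (12 : Int))
          else (ms ++ [fmtA year month], year, month - 1))
          = (ms ++ [fmtA year month], year, month - 1) by simp [hc]]
      rw [ih _ _ _ (by omega) (by omega)]
      rw [List.range_succ_eq_map]
      simp only [List.map_cons, List.map_map, List.append_assoc, List.singleton_append]
      congr 1
      · congr 1
        · rw [← pvFmt_encode year month h1 h2]
          congr 1; omega
        · apply List.map_congr_left
          intro k _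
          simp only [Function.comp]
          congr 1
          push_cast
          omega

-- ===== VERDICT (by name: the statement is the Claim_ definition above) =====
theorem get_last_n_months_spec : Claim_equal_get_last_n_months := by
  intro user_id n _
  unfold Spec_get_last_n_months get_last_n_months get_last_n_months_alt
  simp only []
  rw [loopA_eq _ _ _ _ (by norm_num) (by norm_num)]
  rw [PySem.List.pyRange_one 0 n]
  simp only [List.nil_append, List.length_map, List.length_range, List.map_map]
  apply List.map_congr_left
  intro k _
  simp only [Function.comp]
  congr 1
  omega
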